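-- pv_equiv track=rewrite | github.com/WYRipple/ExpSeek | expseek/agent/react_agent.py | parse_result_one
-- ===== SOURCE A (Python) =====
-- def parse_result_one(result) -> list:
--     """
--     Parse the guide model's stage-one response to extract topic index list.
--     Expects the last non-comment line to be space-separated integers.
--     """
--     content = result.strip().removeprefix('```').removesuffix('```').strip()
--     for line in reversed(content.split('\n')):
--         line = line.strip()
--         if line and not line.startswith('#'):
--             try:
--                 idxs = [int(x) for x in line.split()]
--                 if idxs:
--                     return idxs
--             except ValueError:
--                 continue
--     return []
-- ===== SOURCE B (Python) =====
-- def _parse_line(line):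
--     """Return the integer list for a qualifying line, else None."""
--     line = line.strip()
--     if not line or line.startswith('#'):
--         return None
--     try:
--         return [int(x) for x in line.split()] or None
--     except ValueError:
--         return None
--
--
-- def parse_result_one(result) -> list:
--     content = result.strip().removeprefix('```').removesuffix('```').strip()
--     parses = [p for p in map(_parse_line, content.split('\n')) if p is not None]
--     return parses[-1] if parses else []
-- ===== Notes on version B (the rewrite author's own statement) =====
-- stated objective: alternative
-- what changed: Replaces the reverse scan with early return by a map-then-filter pipeline that collects every qualifying line's parse and returns the last one.
import Mathlib
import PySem

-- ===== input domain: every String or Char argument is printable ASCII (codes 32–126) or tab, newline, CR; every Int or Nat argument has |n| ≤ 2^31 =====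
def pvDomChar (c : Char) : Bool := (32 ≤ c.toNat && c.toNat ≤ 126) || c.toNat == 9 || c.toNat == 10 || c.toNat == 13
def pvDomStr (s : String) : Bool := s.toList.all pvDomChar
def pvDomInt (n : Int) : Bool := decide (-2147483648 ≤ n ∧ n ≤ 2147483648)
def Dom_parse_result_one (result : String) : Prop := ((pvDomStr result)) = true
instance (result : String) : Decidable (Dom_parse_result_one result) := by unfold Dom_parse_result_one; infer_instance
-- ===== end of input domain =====

-- B replaces A's reverse scan with early return by a map/filter pipeline collecting all qualifying parses and taking the last (alternative decomposition, same cost).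


-- ===== PORT A =====
-- content = result.strip().removeprefix('```').removesuffix('```').strip()
-- removeprefix/removesuffix are not PySem primitives; ported by hand (exact: drop/take iff startswith/endswith the 3-char fence)
def prContent (result : String) : List Char :=
  let c := PySem.Chars.strip result.toList
  let c := if PySem.Chars.startswith c ['`','`','`'] then c.drop 3 else c
  let c := if PySem.Chars.endswith c ['`','`','`'] then c.take (c.length - 3) else c
  PySem.Chars.strip c

-- the reversed-for loop with early return
def prA_loop : List (List Char) → List Int
  | [] => []
  | l :: rest =>
    let line := PySem.Chars.strip l
    if line ≠ [] ∧ PySem.Chars.startswith line ['#'] = false then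
      match (PySem.Chars.split₀ line).mapM PySem.Int.ofChars? with
      | some idxs => if idxs ≠ [] then idxs else prA_loop rest
      | none => prA_loop rest
    else prA_loop rest

def parse_result_one (result : String) : List Int :=
  prA_loop (PySem.Chars.splitOn (prContent result) ['\n']).reverse

-- ===== PORT B =====
-- _parse_line: Option-valued parse of one line
def prParseLine? (l : List Char) : Option (List Int) :=
  let line := PySem.Chars.strip l
  if line = [] ∨ PySem.Chars.startswith line ['#'] = true then none
  else
    ((PySem.Chars.split₀ line).mapM PySem.Int.ofChars?).bind
      (fun idxs => if idxs = [] then none else some idxs)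

def parse_result_one_alt (result : String) : List Int :=
  ((PySem.Chars.splitOn (prContent result) ['\n']).filterMap prParseLine?).getLastD []

-- ===== PRECONDITION & SPEC =====
def Spec_parse_result_one (result : String) (out : List Int) : Prop := out = parse_result_one_alt result
instance (result : String) (out : List Int) : Decidable (Spec_parse_result_one result out) := by unfold Spec_parse_result_one; infer_instance

-- ===== CLAIM (what is proved, stated in full; the proofs are below) =====
def Claim_equal_parse_result_one : Prop := ∀ (result : String), Dom_parse_result_one result → Spec_parse_result_one result (parse_result_one result)

-- ===== LEMMAS AND PROOFS =====
-- one step of A's loop is "first parse here, else recurse"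
theorem prA_cons (l : List Char) (rest : List (List Char)) :
    prA_loop (l :: rest) = (prParseLine? l).getD (prA_loop rest) := by
  simp only [prA_loop, prParseLine?]
  by_cases h1 : PySem.Chars.strip l = []
  · simp [h1]
  · by_cases h2 : PySem.Chars.startswith (PySem.Chars.strip l) ['#'] = true
    · simp [h1, h2]
    · cases hm : (PySem.Chars.split₀ (PySem.Chars.strip l)).mapM PySem.Int.ofChars? with
      | none => simp [h1, h2, hm]
      | some idxs => by_cases h3 : idxs = [] <;> simp [h1, h2, hm, h3]

-- A's loop returns the head of the successful parses (default [])
theorem prA_head (rs : List (List Char)) :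
    prA_loop rs = (rs.filterMap prParseLine?).headD [] := by
  induction rs with
  | nil => rfl
  | cons l rest ih =>
    rw [prA_cons, ih]
    cases h : prParseLine? l <;> simp [h]

-- ===== VERDICT (by name: the statement is the Claim_ definition above) =====
theorem parse_result_one_spec : Claim_equal_parse_result_one := by
  intro result _
  unfold Spec_parse_result_one parse_result_one parse_result_one_alt
  rw [prA_head, List.filterMap_reverse]
  cases (List.filterMap prParseLine? (PySem.Chars.splitOn (prContent result) ['\n'])) using List.reverseRecOn with
  | nil => rfl
  | append_singleton xs x => simp
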